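-- pv_equiv track=rewrite | github.com/Felix-hans/GenerativeBenchmarking | data/2705_result_hard_questions/1402/1402.output_4.py | maxSatisfaction
-- ===== SOURCE A (Python) =====
-- from typing import List
--
-- def maxSatisfaction(satisfaction: List[int]) -> int:
--     satisfaction.sort()  # Sort the satisfaction array in non-decreasing order
--     n = len(satisfaction)
--     max_coefficient = 0
--     total_time = 0
--
--     for i in range(n - 1, -1, -1):
--         if satisfaction[i] + total_time <= 0:
--             break
--         total_time += satisfaction[i]
--         max_coefficient += total_time
--
--     return max_coefficient
-- ===== SOURCE B (Python) =====
-- def maxSatisfaction(satisfaction):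
--     satisfaction.sort()
--     n = len(satisfaction)
--     # suffix sums: suf[i] = satisfaction[i] + ... + satisfaction[n-1]
--     suf = [0] * (n + 1)
--     for i in range(n - 1, -1, -1):
--         suf[i] = satisfaction[i] + suf[i + 1]
--     # smallest k such that every suffix starting in [k, n) has positive sum
--     k = n
--     while k > 0 and suf[k - 1] > 0:
--         k -= 1
--     return sum((i - k + 1) * satisfaction[i] for i in range(k, n))
-- ===== Notes on version B (the rewrite author's own statement) =====
-- stated objective: alternative
-- what changed: Replaces A's single backward greedy loop with a break by three separate passes: build an explicit suffix-sum array, scan it to find the cut index k, then compute the answer as a direct weighted sum (i-k+1)*satisfaction[i].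
import Mathlib
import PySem

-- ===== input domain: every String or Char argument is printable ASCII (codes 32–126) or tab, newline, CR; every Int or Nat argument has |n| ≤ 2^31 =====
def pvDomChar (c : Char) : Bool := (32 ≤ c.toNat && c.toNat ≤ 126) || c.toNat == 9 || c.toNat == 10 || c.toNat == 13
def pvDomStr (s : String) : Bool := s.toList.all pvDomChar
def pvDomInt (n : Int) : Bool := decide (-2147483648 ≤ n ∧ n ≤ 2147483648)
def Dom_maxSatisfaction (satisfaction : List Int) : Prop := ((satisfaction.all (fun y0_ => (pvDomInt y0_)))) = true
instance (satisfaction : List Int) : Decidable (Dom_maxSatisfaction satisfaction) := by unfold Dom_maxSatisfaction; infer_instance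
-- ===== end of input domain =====

-- B re-implements A in three passes (suffix-sum array, cut-index scan, weighted sum)
-- instead of A's single backward greedy loop with a break; same return value, not faster.
-- Both Pythons sort the argument list in place; the equivalence proved is about the return value.

-- ===== PORT A =====
-- the backward loop of A: iterates the sorted list from the largest element down, breaking
-- when satisfaction[i] + total_time <= 0
def maxSatisfactionLoop : List Int → Int → Int → Int
  | [], _, mc => mc
  | x :: rest, total, mc =>
    if x + total ≤ 0 then mc
    else maxSatisfactionLoop rest (total + x) (mc + (total + x))

def maxSatisfaction (satisfaction : List Int) : Int :=
  maxSatisfactionLoop (PySem.List.sorted satisfaction (fun x => x) false).reverse 0 0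

-- ===== PORT B =====
-- Source B's suffix-sum array suf (length n+1, built back to front, last entry 0)
def altSuf : List Int → List Int
  | [] => [0]
  | x :: rest =>
    let t := altSuf rest
    (x + t.headI) :: t

def maxSatisfaction_alt (satisfaction : List Int) : Int :=
  let s := PySem.List.sorted satisfaction (fun x => x) false
  let suf := altSuf s
  -- Source B's while loop: k counts down from n while suf[k-1] > 0; cnt = n - k
  let cnt := (suf.dropLast.reverse.takeWhile (fun v => decide (0 < v))).length
  -- Source B's weighted sum over range(k, n): weight i-k+1 for element i
  let seg := s.drop (s.length - cnt)
  (seg.zipIdx.map (fun p => ((p.2 : Int) + 1) * p.1)).sum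

-- ===== PRECONDITION & SPEC =====
def Spec_maxSatisfaction (satisfaction : List Int) (out : Int) : Prop := out = maxSatisfaction_alt satisfaction
instance (satisfaction : List Int) (out : Int) : Decidable (Spec_maxSatisfaction satisfaction out) := by unfold Spec_maxSatisfaction; infer_instance

-- ===== CLAIM (what is proved, stated in full; the proofs are below) =====
def Claim_equal_maxSatisfaction : Prop := ∀ (satisfaction : List Int), Dom_maxSatisfaction satisfaction → Spec_maxSatisfaction satisfaction (maxSatisfaction satisfaction)

-- ===== LEMMAS AND PROOFS =====

-- running prefix sums of r with offset t: [t+r0, t+r0+r1, ...]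
def pref : List Int → Int → List Int
  | [], _ => []
  | x :: rest, t => (t + x) :: pref rest (t + x)

theorem pref_length (r : List Int) (t : Int) : (pref r t).length = r.length := by
  induction r generalizing t with
  | nil => rfl
  | cons x rest ih => simp [pref, ih]

theorem pref_append_singleton (l : List Int) (x : Int) (t : Int) :
    pref (l ++ [x]) t = pref l t ++ [t + l.sum + x] := by
  induction l generalizing t with
  | nil => simp [pref]
  | cons y rest ih => simp [pref, ih]; ring_nf

theorem pref_take (r : List Int) (t : Int) (k : Nat) :
    (pref r t).take k = pref (r.take k) t := by
  induction r generalizing t k with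
  | nil => simp [pref]
  | cons x rest ih =>
    cases k with
    | zero => simp [pref]
    | succ m => simp [pref, ih]

theorem altSuf_ne_nil (s : List Int) : altSuf s ≠ [] := by
  cases s <;> simp [altSuf]

theorem altSuf_headI (s : List Int) : (altSuf s).headI = s.sum := by
  induction s with
  | nil => rfl
  | cons x rest ih => simp [altSuf, ih]

theorem altSuf_dropLast_reverse (s : List Int) :
    (altSuf s).dropLast.reverse = pref s.reverse 0 := by
  induction s with
  | nil => rfl
  | cons x rest ih =>
    have h := altSuf_ne_nil rest
    simp [altSuf, List.dropLast_cons_of_ne_nil h, ih, pref_append_singleton,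
      altSuf_headI, add_comm]

-- A's loop computes acc + the sum of the positive takeWhile-prefix of the running sums
theorem loop_eq (r : List Int) (t acc : Int) :
    maxSatisfactionLoop r t acc
      = acc + ((pref r t).takeWhile (fun v => decide (0 < v))).sum := by
  induction r generalizing t acc with
  | nil => simp [maxSatisfactionLoop, pref]
  | cons x rest ih =>
    by_cases h : x + t ≤ 0
    · have : ¬ (0 < t + x) := by omega
      simp [maxSatisfactionLoop, pref, h, this]
    · have h1 : 0 < t + x := by omega
      simp [maxSatisfactionLoop, pref, h, h1, ih]
      ring

-- weighted-sum identity: the sum of the running prefix sums of u equals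
-- the (index+1)-weighted sum over u.reverse
theorem pref_sum_eq_weighted (u : List Int) :
    (pref u 0).sum
      = ((u.reverse).zipIdx.map (fun p => ((p.2 : Int) + 1) * p.1)).sum := by
  induction u with
  | nil => rfl
  | cons x v ih =>
    have hoff : ∀ (w : List Int) (a b : Int), pref w (a + b) = (pref w a).map (· + b) := by
      intro w
      induction w with
      | nil => intro a b; rfl
      | cons y rest ihw =>
        intro a b
        simp only [pref, List.map_cons]
        rw [show a + b + y = (a + y) + b by ring, ihw (a + y) b,
          show a + y + b = a + b + y by ring]
    have h1 : pref v x = (pref v 0).map (· + x) := by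
      have := hoff v 0 x; simpa using this
    have h2 : ((pref v 0).map (· + x)).sum = (pref v 0).sum + (pref v 0).length * x := by
      induction (pref v 0) with
      | nil => simp
      | cons a l ihl => simp [ihl]; push_cast; ring
    simp only [pref, List.reverse_cons, List.zipIdx_append, List.map_append, List.sum_append,
      List.sum_cons, ← ih]
    simp [List.zipIdx]
    rw [h1, h2, pref_length]
    ring

theorem takeWhile_eq_take_length (p : Int → Bool) (l : List Int) :
    l.takeWhile p = l.take (l.takeWhile p).length := by
  induction l with
  | nil => rfl
  | cons x rest ih =>
    by_cases h : p x
    · simp only [List.takeWhile_cons, h, if_true, List.length_cons, List.take_succ_cons]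
      exact congrArg (x :: ·) ih
    · simp [h]

theorem key (s : List Int) :
    maxSatisfactionLoop s.reverse 0 0
      = ((s.drop (s.length
            - ((altSuf s).dropLast.reverse.takeWhile (fun v => decide (0 < v))).length)).zipIdx.map
          (fun p => ((p.2 : Int) + 1) * p.1)).sum := by
  rw [loop_eq, altSuf_dropLast_reverse, zero_add]
  have h1 : (pref s.reverse 0).takeWhile (fun v => decide (0 < v))
      = pref (s.reverse.take
          (((pref s.reverse 0).takeWhile (fun v => decide (0 < v))).length)) 0 := by
    conv_lhs => rw [takeWhile_eq_take_length]
    rw [pref_take]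
  have h2 : (s.reverse.take
        (((pref s.reverse 0).takeWhile (fun v => decide (0 < v))).length)).reverse
      = s.drop (s.length
          - ((pref s.reverse 0).takeWhile (fun v => decide (0 < v))).length) := by
    rw [List.take_reverse, List.reverse_reverse]
  have hle : ((pref s.reverse 0).takeWhile (fun v => decide (0 < v))).length ≤ s.length := by
    have := (List.takeWhile_prefix (l := pref s.reverse 0)
      (p := fun v => decide (0 < v))).length_le
    simpa [pref_length] using this
  rw [h1, pref_sum_eq_weighted, h2, pref_length, List.length_take, List.length_reverse,
    Nat.min_eq_left hle]

-- ===== VERDICT (by name: the statement is the Claim_ definition above) =====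
theorem maxSatisfaction_spec : Claim_equal_maxSatisfaction := by
  intro satisfaction _
  unfold Spec_maxSatisfaction maxSatisfaction maxSatisfaction_alt
  exact key (PySem.List.sorted satisfaction (fun x => x) false)
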